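-- pv_equiv track=rewrite | github.com/LightProgrammer000/ProgrammingLogic | 6. Python/EX53.py | analiseLucro
-- ===== SOURCE A (Python) =====
-- def analiseLucro(flag1, flag2, flag3, luc, tam):
--
--     # Analisa o lucro e define as flags de acordo com os intervalos de lucro
--     for i in range(0, tam):
--         if luc[i] < 10:
--             flag1 = True  # Flag para lucro abaixo de 10%
--
--         elif 10 <= luc[i] <= 20:
--             flag2 = True  # Flag para lucro entre 10% e 20%
--
--         elif luc[i] > 20:
--             flag3 = True  # Flag para lucro acima de 20%
--
--     return flag1, flag2, flag3
-- ===== SOURCE B (Python) =====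
-- def analiseLucro(flag1, flag2, flag3, luc, tam):
--     window = luc[:max(tam, 0)]
--     return (flag1 or any(l < 10 for l in window),
--             flag2 or any(10 <= l <= 20 for l in window),
--             flag3 or any(l > 20 for l in window))
-- ===== Notes on version B (the rewrite author's own statement) =====
-- stated objective: idiomatic
-- what changed: Replaces the single index loop with three mutable flags by three independent any() scans over the prefix luc[:tam], OR-ed with the incoming flags.
import Mathlib
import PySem

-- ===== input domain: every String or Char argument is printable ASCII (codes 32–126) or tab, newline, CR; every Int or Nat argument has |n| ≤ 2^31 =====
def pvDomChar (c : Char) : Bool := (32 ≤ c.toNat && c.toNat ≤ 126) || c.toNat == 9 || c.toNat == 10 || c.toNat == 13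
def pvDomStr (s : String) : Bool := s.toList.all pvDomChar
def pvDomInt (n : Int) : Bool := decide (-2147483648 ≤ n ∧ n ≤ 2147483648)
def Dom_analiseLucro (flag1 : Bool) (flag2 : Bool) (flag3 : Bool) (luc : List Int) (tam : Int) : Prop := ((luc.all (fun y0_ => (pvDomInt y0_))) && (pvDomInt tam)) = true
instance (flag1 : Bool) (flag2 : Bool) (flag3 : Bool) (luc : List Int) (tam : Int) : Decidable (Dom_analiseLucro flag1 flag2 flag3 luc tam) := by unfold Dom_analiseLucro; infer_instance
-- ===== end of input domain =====

-- B replaces A's single index loop over three mutable flags by three independent any-scans over the prefix luc[:tam] (idiomatic); same O(n) cost.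


-- ===== PORT A =====
-- loop body of A: read luc[i] (in range under Pre_), update the flags by the elif cascade
def analiseLucroStep (s : Bool × Bool × Bool) (x : Int) : Bool × Bool × Bool :=
  if x < 10 then (true, s.2.1, s.2.2)
  else if 10 ≤ x ∧ x ≤ 20 then (s.1, true, s.2.2)
  else if x > 20 then (s.1, s.2.1, true)
  else s

def analiseLucro (flag1 : Bool) (flag2 : Bool) (flag3 : Bool) (luc : List Int) (tam : Int) : Bool × Bool × Bool :=
  (PySem.List.pyRange 0 tam 1).foldl
    (fun s i => analiseLucroStep s (PySem.List.pyGetD luc i 0)) (flag1, flag2, flag3)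

-- ===== PORT B =====
def analiseLucro_alt (flag1 : Bool) (flag2 : Bool) (flag3 : Bool) (luc : List Int) (tam : Int) : Bool × Bool × Bool :=
  let window := PySem.List.slice luc none (some (max tam 0))
  (flag1 || window.any (fun l => l < 10),
   flag2 || window.any (fun l => decide (10 ≤ l) && decide (l ≤ 20)),
   flag3 || window.any (fun l => l > 20))

-- ===== PRECONDITION & SPEC =====
-- A raises IndexError when tam exceeds len(luc); exactly those inputs are excluded.
def Pre_analiseLucro (flag1 : Bool) (flag2 : Bool) (flag3 : Bool) (luc : List Int) (tam : Int) : Prop :=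
  tam ≤ (luc.length : Int)
instance (flag1 : Bool) (flag2 : Bool) (flag3 : Bool) (luc : List Int) (tam : Int) : Decidable (Pre_analiseLucro flag1 flag2 flag3 luc tam) := by unfold Pre_analiseLucro; infer_instance
def pvWitness_analiseLucro : Bool × Bool × Bool × List Int × Int := (false, false, false, [5, 15, 25], 3)

def Spec_analiseLucro (flag1 : Bool) (flag2 : Bool) (flag3 : Bool) (luc : List Int) (tam : Int) (out : Bool × Bool × Bool) : Prop := out = analiseLucro_alt flag1 flag2 flag3 luc tam
instance (flag1 : Bool) (flag2 : Bool) (flag3 : Bool) (luc : List Int) (tam : Int) (out : Bool × Bool × Bool) : Decidable (Spec_analiseLucro flag1 flag2 flag3 luc tam out) := by unfold Spec_analiseLucro; infer_instance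

-- ===== CLAIM (what is proved, stated in full; the proofs are below) =====
def Claim_equal_analiseLucro : Prop := ∀ (flag1 : Bool) (flag2 : Bool) (flag3 : Bool) (luc : List Int) (tam : Int), Dom_analiseLucro flag1 flag2 flag3 luc tam → Pre_analiseLucro flag1 flag2 flag3 luc tam → Spec_analiseLucro flag1 flag2 flag3 luc tam (analiseLucro flag1 flag2 flag3 luc tam)
-- ===== LEMMAS AND PROOFS =====

-- folding A's step over a list is the three any-scans OR-ed with the incoming flags
lemma foldl_step_eq_any (w : List Int) (f1 f2 f3 : Bool) :
    w.foldl analiseLucroStep (f1, f2, f3) =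
      (f1 || w.any (fun l => l < 10),
       f2 || w.any (fun l => decide (10 ≤ l) && decide (l ≤ 20)),
       f3 || w.any (fun l => l > 20)) := by
  induction w generalizing f1 f2 f3 with
  | nil => simp
  | cons x xs ih =>
    simp only [List.foldl_cons, List.any_cons]
    by_cases h1 : x < 10
    · rw [show analiseLucroStep (f1, f2, f3) x = (true, f2, f3) by
        simp [analiseLucroStep, h1]]
      rw [ih]
      simp [h1, show ¬ (10 ≤ x) by omega, show ¬ (x > 20) by omega]
    · by_cases h2 : 10 ≤ x ∧ x ≤ 20
      · rw [show analiseLucroStep (f1, f2, f3) x = (f1, true, f3) by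
          simp [analiseLucroStep, h1, h2]]
        rw [ih]
        simp [h1, h2.1, h2.2, show ¬ (x > 20) by omega]
      · have h3 : x > 20 := by omega
        rw [show analiseLucroStep (f1, f2, f3) x = (f1, f2, true) by
          simp [analiseLucroStep, h1, h2, h3]]
        rw [ih]
        simp [h1, h3, show ¬ (x ≤ 20) by omega]

-- A's index loop over range(0, tam) is a fold over the prefix luc[:max(tam,0)]
lemma foldl_range_eq_take (luc : List Int) (tam : Int) (h : tam ≤ (luc.length : Int))
    (init : Bool × Bool × Bool) :
    (PySem.List.pyRange 0 tam 1).foldl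
      (fun s i => analiseLucroStep s (PySem.List.pyGetD luc i 0)) init =
    (luc.take (max tam 0).toNat).foldl analiseLucroStep init := by
  by_cases hle : tam ≤ 0
  · rw [PySem.List.pyRange_one_eq_nil (by omega)]
    have : (max tam 0).toNat = 0 := by omega
    simp [this]
  · have hlen : ((luc.take (max tam 0).toNat).length : Int) = tam := by
      simp; omega
    have := PySem.List.foldl_pyRange_pyGetD' (luc.take (max tam 0).toNat) (0 : Int)
      analiseLucroStep init (le_refl 0)
    rw [hlen] at this
    simp only [Int.toNat_zero, List.drop_zero] at this
    rw [← this]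
    apply PySem.List.foldl_congr_mem
    intro s i hi
    have hmem := (PySem.List.mem_pyRange_one).mp hi
    congr 1
    rw [PySem.List.pyGetD_eq_getElem luc 0 (by omega) (by omega),
        PySem.List.pyGetD_eq_getElem (List.take (max tam 0).toNat luc) 0 (by omega) (by omega)]
    simp [List.getElem_take]

-- ===== VERDICT (by name: the statement is the Claim_ definition above) =====
theorem analiseLucro_spec : Claim_equal_analiseLucro := by
  intro f1 f2 f3 luc tam _ hpre
  unfold Spec_analiseLucro analiseLucro analiseLucro_alt
  rw [foldl_range_eq_take luc tam hpre, foldl_step_eq_any]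
  rw [PySem.List.slice_to luc (show (0:Int) ≤ max tam 0 by omega)]
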